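-- pv_equiv track=rewrite | github.com/mmore21/competitive | leetcode/m_1630.py | is_valid_subarray
-- ===== SOURCE A (Python) =====
-- def is_valid_subarray(sub):
--     diff = None
--     for i in range(len(sub) - 1):
--         d = sub[i+1] - sub[i]
--         if diff == None:
--             diff = d
--         elif diff != d:
--             return False
--     return True
-- ===== SOURCE B (Python) =====
-- def is_valid_subarray(sub):
--     diffs = [sub[i+1] - sub[i] for i in range(len(sub) - 1)]
--     return len(set(diffs)) <= 1
-- ===== Notes on version B (the rewrite author's own statement) =====
-- stated objective: idiomatic
-- what changed: B materialises the list of consecutive differences and checks that it has at most one distinct value via a set, instead of A's stateful scan with a running first-difference sentinel and early return.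
import Mathlib
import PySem

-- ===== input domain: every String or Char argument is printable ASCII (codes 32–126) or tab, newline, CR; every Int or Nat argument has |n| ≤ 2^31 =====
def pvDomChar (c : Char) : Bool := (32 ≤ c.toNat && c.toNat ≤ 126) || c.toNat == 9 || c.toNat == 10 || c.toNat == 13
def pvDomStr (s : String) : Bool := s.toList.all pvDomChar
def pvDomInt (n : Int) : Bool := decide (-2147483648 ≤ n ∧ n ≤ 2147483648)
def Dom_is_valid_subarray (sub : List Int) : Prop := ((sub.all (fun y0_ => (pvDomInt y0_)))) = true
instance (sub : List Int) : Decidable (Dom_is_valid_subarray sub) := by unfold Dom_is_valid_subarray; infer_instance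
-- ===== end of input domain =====

-- B replaces A's stateful scan (running first difference + early return) by building the
-- list of consecutive differences and checking it has at most one distinct value (a set) — idiomatic.


-- ===== PORT A =====
-- loop over range(len(sub)-1) with state diff : Option Int; returning false models 'return False'
def isValidLoop (sub : List Int) (idxs : List Int) (diff : Option Int) : Bool :=
  match idxs with
  | [] => true
  | i :: rest =>
    let d := PySem.List.pyGetD sub (i + 1) 0 - PySem.List.pyGetD sub i 0
    match diff with
    | none => isValidLoop sub rest (some d)
    | some df => if df ≠ d then false else isValidLoop sub rest (some df)

def is_valid_subarray (sub : List Int) : Bool :=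
  isValidLoop sub (PySem.List.pyRange 0 ((sub.length : Int) - 1) 1) none

-- ===== PORT B =====
def is_valid_subarray_alt (sub : List Int) : Bool :=
  let diffs := (PySem.List.pyRange 0 ((sub.length : Int) - 1) 1).map
    (fun i => PySem.List.pyGetD sub (i + 1) 0 - PySem.List.pyGetD sub i 0)
  (PySem.Set.ofList diffs).length ≤ 1

-- ===== PRECONDITION & SPEC =====
def Spec_is_valid_subarray (sub : List Int) (out : Bool) : Prop := out = is_valid_subarray_alt sub
instance (sub : List Int) (out : Bool) : Decidable (Spec_is_valid_subarray sub out) := by unfold Spec_is_valid_subarray; infer_instance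

-- ===== CLAIM (what is proved, stated in full; the proofs are below) =====
def Claim_equal_is_valid_subarray : Prop := ∀ (sub : List Int), Dom_is_valid_subarray sub → Spec_is_valid_subarray sub (is_valid_subarray sub)

-- ===== LEMMAS AND PROOFS =====
-- A's loop on the list of differences (the index list is only a vehicle for the d's)
def runA : List Int → Option Int → Bool
  | [], _ => true
  | d :: rest, none => runA rest (some d)
  | d :: rest, some df => if df ≠ d then false else runA rest (some df)

theorem isValidLoop_eq_runA (sub : List Int) (idxs : List Int) (diff : Option Int) :
    isValidLoop sub idxs diff
      = runA (idxs.map (fun i => PySem.List.pyGetD sub (i + 1) 0 - PySem.List.pyGetD sub i 0)) diff := by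
  induction idxs generalizing diff with
  | nil => rfl
  | cons i rest ih =>
    cases diff with
    | none => simp [isValidLoop, runA, ih]
    | some df => by_cases h : df = (PySem.List.pyGetD sub (i + 1) 0 - PySem.List.pyGetD sub i 0) <;>
        simp [isValidLoop, runA, h, ih]

theorem runA_some (ds : List Int) (d : Int) : runA ds (some d) = ds.all (fun e => e == d) := by
  induction ds with
  | nil => rfl
  | cons e rest ih =>
    simp only [runA, List.all_cons]
    by_cases h : d = e
    · subst h; simp [ih]
    · rw [if_pos h]
      have : (e == d) = false := by
        simp only [beq_eq_false_iff_ne]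
        exact fun hxd => h hxd.symm
      simp [this]

theorem ofList_len_le_one (xs : List Int) :
    (PySem.Set.ofList xs).length ≤ 1 ↔ ∀ a ∈ xs, ∀ b ∈ xs, a = b := by
  constructor
  · intro h a ha b hb
    have ha' : a ∈ PySem.Set.ofList xs := Iff.mpr (PySem.Set.mem_ofList xs _) ha
    have hb' : b ∈ PySem.Set.ofList xs := Iff.mpr (PySem.Set.mem_ofList xs _) hb
    cases hl : PySem.Set.ofList xs with
    | nil => rw [hl] at ha'; cases ha'
    | cons c t =>
      rw [hl] at h ha' hb'
      cases t with
      | nil =>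
        simp only [List.mem_singleton] at ha' hb'
        rw [ha', hb']
      | cons c2 t2 => simp at h
  · intro h
    by_contra hlen
    push Not at hlen
    have hnd : (PySem.Set.ofList xs).Nodup := PySem.Set.nodup_ofList xs
    cases hl : PySem.Set.ofList xs with
    | nil => rw [hl] at hlen; simp at hlen
    | cons a t =>
      cases t with
      | nil => rw [hl] at hlen; simp at hlen
      | cons b t2 =>
        rw [hl] at hnd
        have hab : a ≠ b := by
          have := List.nodup_cons.mp hnd
          exact fun he => this.1 (he ▸ List.mem_cons_self ..)
        have ha : a ∈ xs := Iff.mp (PySem.Set.mem_ofList xs _) (hl ▸ List.mem_cons_self ..)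
        have hb : b ∈ xs := Iff.mp (PySem.Set.mem_ofList xs _)
          (hl ▸ List.mem_cons_of_mem a (List.mem_cons_self ..))
        exact hab (h a ha b hb)

theorem alt_eq_runA (sub : List Int) :
    is_valid_subarray_alt sub
      = runA ((PySem.List.pyRange 0 ((sub.length : Int) - 1) 1).map
          (fun i => PySem.List.pyGetD sub (i + 1) 0 - PySem.List.pyGetD sub i 0)) none := by
  unfold is_valid_subarray_alt
  cases hds : (PySem.List.pyRange 0 ((sub.length : Int) - 1) 1).map
      (fun i => PySem.List.pyGetD sub (i + 1) 0 - PySem.List.pyGetD sub i 0) with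
  | nil => simp [PySem.Set.ofList, runA]
  | cons d rest =>
    simp only [runA, runA_some]
    rw [Bool.eq_iff_iff]
    simp only [decide_eq_true_eq, List.all_eq_true, beq_iff_eq, ofList_len_le_one]
    constructor
    · intro h e he
      exact h e (List.mem_cons_of_mem d he) d (List.mem_cons_self ..)
    · intro h a ha b hb
      have va : a = d := by
        rcases List.mem_cons.mp ha with h1 | h1
        · exact h1
        · exact h a h1
      have vb : b = d := by
        rcases List.mem_cons.mp hb with h1 | h1
        · exact h1
        · exact h b h1
      rw [va, vb]

-- ===== VERDICT (by name: the statement is the Claim_ definition above) =====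
theorem is_valid_subarray_spec : Claim_equal_is_valid_subarray := by
  intro sub _
  unfold Spec_is_valid_subarray is_valid_subarray
  rw [isValidLoop_eq_runA, alt_eq_runA]
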